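-- pv_equiv track=rewrite | github.com/Keinazj/FOCP-project-threes-game- | phase 2 project threes focp.py | add_random_up
-- ===== SOURCE A (Python) =====
-- def add_random_up(board,d,mod):
--
--     tedad0 = -1
--     satr = board[len(board)-1]
--     for i in range(len(satr)):
--         if satr[i] == "0":
--             tedad0 +=1
--             if tedad0 == mod:
--                 board[len(board)-1][i]= d
--                 break
--
--     return board
-- ===== SOURCE B (Python) =====
-- def add_random_up(board, d, mod):
--     # index-table approach: collect positions of "0" in the last row once,
--     # then place d by direct lookup of the mod-th zero (mutates board like A)
--     zeros = [i for i, v in enumerate(board[-1]) if v == "0"]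
--     if 0 <= mod < len(zeros):
--         board[-1][zeros[mod]] = d
--     return board
-- ===== Notes on version B (the rewrite author's own statement) =====
-- stated objective: simpler
-- what changed: Replaces the counting scan with early break by building the index list of zeros in the last row once and placing d via a direct positional lookup zeros[mod]; Pre_ excludes only the empty board, on which A raises IndexError.
import Mathlib
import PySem

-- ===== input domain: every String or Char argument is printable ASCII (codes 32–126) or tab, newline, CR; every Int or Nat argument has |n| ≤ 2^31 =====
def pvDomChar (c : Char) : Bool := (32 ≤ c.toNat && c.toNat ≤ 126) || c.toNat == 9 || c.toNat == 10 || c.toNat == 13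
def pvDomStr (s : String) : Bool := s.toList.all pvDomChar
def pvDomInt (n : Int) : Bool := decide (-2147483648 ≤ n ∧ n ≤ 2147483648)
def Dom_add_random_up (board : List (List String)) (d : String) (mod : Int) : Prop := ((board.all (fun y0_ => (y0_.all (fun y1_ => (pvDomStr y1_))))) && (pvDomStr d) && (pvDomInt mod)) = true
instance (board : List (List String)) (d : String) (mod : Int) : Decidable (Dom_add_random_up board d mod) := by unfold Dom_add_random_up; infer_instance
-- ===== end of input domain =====

-- B replaces A's counting scan (with early break) by an index table of the zeros of the
-- last row plus one positional lookup; equivalence is about the RETURN value (the Python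
-- originals both mutate board in place).

-- ===== PORT A =====
-- the for-loop of A: walk satr with running index i and counter tedad0; return the index
-- where the break fires (none = loop ran to the end without a break)
def aLoop (satr : List String) (mod : Int) (tedad0 : Int) (i : Nat) : Option Nat :=
  match satr with
  | [] => none
  | s :: rest =>
    if s == "0" then
      if tedad0 + 1 == mod then some i
      else aLoop rest mod (tedad0 + 1) (i + 1)
    else aLoop rest mod tedad0 (i + 1)

def add_random_up (board : List (List String)) (d : String) (mod : Int) : List (List String) :=
  -- satr = board[len(board)-1]  (IndexError on empty board: excluded by Pre_)
  let satr := PySem.List.pyGetD board ((board.length : Int) - 1) []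
  match aLoop satr mod (-1) 0 with
  | some i => PySem.List.pySetD board ((board.length : Int) - 1) (PySem.List.pySetD satr (i : Int) d)
  | none => board

-- ===== PORT B =====
def add_random_up_alt (board : List (List String)) (d : String) (mod : Int) : List (List String) :=
  -- zeros = [i for i, v in enumerate(board[-1]) if v == "0"]
  let last := PySem.List.pyGetD board (-1) []
  let zeros : List Int := ((PySem.List.enumerate last 0).filter (fun p => p.2 == "0")).map (·.1)
  if 0 ≤ mod ∧ mod < (zeros.length : Int) then
    PySem.List.pySetD board (-1) (PySem.List.pySetD last (PySem.List.pyGetD zeros mod 0) d)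
  else board

-- ===== PRECONDITION & SPEC =====
-- Pre_ excludes exactly the empty board, on which A raises IndexError (board[len(board)-1]).
def Pre_add_random_up (board : List (List String)) (d : String) (mod : Int) : Prop := board ≠ []
instance (board : List (List String)) (d : String) (mod : Int) : Decidable (Pre_add_random_up board d mod) := by unfold Pre_add_random_up; infer_instance
def pvWitness_add_random_up : List (List String) × String × Int := ([["0", "1", "0"]], "3", 1)

def Spec_add_random_up (board : List (List String)) (d : String) (mod : Int) (out : List (List String)) : Prop := out = add_random_up_alt board d mod
instance (board : List (List String)) (d : String) (mod : Int) (out : List (List String)) : Decidable (Spec_add_random_up board d mod out) := by unfold Spec_add_random_up; infer_instance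

-- ===== CLAIM (what is proved, stated in full; the proofs are below) =====
def Claim_equal_add_random_up : Prop := ∀ (board : List (List String)) (d : String) (mod : Int), Dom_add_random_up board d mod → Pre_add_random_up board d mod → Spec_add_random_up board d mod (add_random_up board d mod)

-- ===== LEMMAS AND PROOFS =====

-- the list of zero positions of satr, offset by i
def zerosFrom (satr : List String) (i : Nat) : List Nat :=
  match satr with
  | [] => []
  | s :: rest => if s == "0" then i :: zerosFrom rest (i + 1) else zerosFrom rest (i + 1)

theorem zerosFrom_eq_filter (satr : List String) (i : Nat) :
    ((PySem.List.enumerate satr (i : Int)).filter (fun p => p.2 == "0")).map (·.1)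
      = (zerosFrom satr i).map (Nat.cast : Nat → Int) := by
  induction satr generalizing i with
  | nil => simp [zerosFrom, PySem.List.enumerate_nil]
  | cons s rest ih =>
    simp only [zerosFrom, PySem.List.enumerate_cons, List.filter_cons]
    have := ih (i + 1)
    push_cast at this ⊢
    by_cases h : s == "0" <;> simp [h, this]

theorem aLoop_eq (satr : List String) (mod : Int) :
    ∀ (t : Int) (i : Nat),
      aLoop satr mod t i =
        ((zerosFrom satr i)[(mod - t - 1).toNat]?).filter (fun _ => decide (mod > t)) := by
  induction satr with
  | nil => intro t i; simp [aLoop, zerosFrom]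
  | cons s rest ih =>
    intro t i
    simp only [aLoop, zerosFrom]
    by_cases h0 : s == "0"
    · simp only [h0, if_true]
      by_cases heq : t + 1 == mod
      · have hm : mod = t + 1 := by have := of_decide_eq_true heq; omega
        subst hm
        simp [Option.filter, show t < t + 1 by omega]
      · have hne : mod ≠ t + 1 := by
          intro hc; exact absurd (by simp [hc] : (t + 1 == mod) = true) (by simpa using heq)
        rw [if_neg (by simpa using heq), ih (t + 1) (i + 1)]
        by_cases hgt : mod > t + 1
        · have h1 : (mod - t - 1).toNat = (mod - (t + 1) - 1).toNat + 1 := by omega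
          simp [h1, hgt, show mod > t by omega]
        · have : ¬ mod > t ∨ mod = t + 1 := by omega
          rcases this with h | h
          · simp [show ¬ mod > t + 1 by omega, h]
          · exact absurd h hne
    · simp only [h0, Bool.false_eq_true, if_false]
      rw [ih t (i + 1)]

-- writing to board[-1] equals writing to board[len(board)-1] on a nonempty board
theorem pySetD_neg_one_eq (board : List (List String)) (hne : board ≠ []) (row : List String) :
    PySem.List.pySetD board (-1) row
      = PySem.List.pySetD board ((board.length : Int) - 1) row := by
  have hlen : 0 < board.length := List.length_pos_iff.mpr hne
  rw [PySem.List.pySetD_of_nonneg board row (by omega : (0:Int) ≤ (board.length : Int) - 1)]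
  simp only [PySem.List.pySetD, PySem.List.pySet?, PySem.List.pyIdx?]
  rw [if_neg (by omega : ¬ (0:Int) ≤ -1), if_pos (by omega : -((board.length:Int)) ≤ -1)]
  simp only [Option.map_some, Option.getD_some]
  congr 1
  omega

theorem add_random_up_spec : Claim_equal_add_random_up := by
  intro board d mod _ hpre
  unfold Spec_add_random_up add_random_up add_random_up_alt
  have hne : board ≠ [] := hpre
  have hlen : 0 < board.length := List.length_pos_iff.mpr hne
  have hneg1 : PySem.List.pyGetD board (-1) ([] : List String)
      = PySem.List.pyGetD board ((board.length : Int) - 1) [] := by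
    rw [PySem.List.pyGetD_neg_one board ([] : List String) hne]
    rw [PySem.List.pyGetD_eq_getElem board ([] : List String) (by omega) (by omega)]
    simp only [List.getLast_eq_getElem]
    congr 1
    omega
  simp only [hneg1]
  set satr := PySem.List.pyGetD board ((board.length : Int) - 1) [] with hsatr
  have hz := zerosFrom_eq_filter satr 0
  rw [Nat.cast_zero] at hz
  rw [hz, aLoop_eq satr mod (-1) 0]
  simp only [List.length_map]
  have harith : (mod - (-1) - 1).toNat = mod.toNat := by omega
  rw [harith]
  by_cases hm : 0 ≤ mod ∧ mod < ((zerosFrom satr 0).length : Int)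
  · have hlt : mod.toNat < (zerosFrom satr 0).length := by omega
    rw [List.getElem?_eq_getElem hlt]
    have hfil : (some (zerosFrom satr 0)[mod.toNat]).filter (fun _ => decide (mod > -1)) =
        some (zerosFrom satr 0)[mod.toNat] := by
      simp [Option.filter, show mod > -1 by omega]
    rw [hfil, if_pos hm]
    rw [pySetD_neg_one_eq board hne]
    rw [PySem.List.pyGetD_eq_getElem _ (0:Int) hm.1 (by simpa using hm.2)]
    rw [List.getElem_map]
  · rw [if_neg hm]
    by_cases h0 : 0 ≤ mod
    · have : (zerosFrom satr 0)[mod.toNat]? = none :=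
        List.getElem?_eq_none (by omega)
      rw [this, Option.filter_none]
    · have : decide (mod > -1) = false := by simp; omega
      rcases h : (zerosFrom satr 0)[mod.toNat]? with _ | v
      · rw [Option.filter_none]
      · simp [Option.filter, this]
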